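-- pv_equiv track=rewrite | github.com/costa-group/forves | gen_tests_for_ocaml.py | bin_to_word
-- ===== SOURCE A (Python) =====
-- def bin_to_word(b : str) :
--     word = 'WO'
--     for d in b:
--         if d == '0':
--             word = f'(WS false {word})'
--         else:
--             word = f'(WS true {word})'
--     return word
-- ===== SOURCE B (Python) =====
-- def bin_to_word(b : str) :
--     prefix = ''.join('(WS false ' if d == '0' else '(WS true ' for d in reversed(b))
--     return prefix + 'WO' + ')' * len(b)
-- ===== Notes on version B (the rewrite author's own statement) =====
-- stated objective: faster
-- what changed: Replaces the per-character two-sided wrapping of a growing accumulator string with a single flat assembly: opening tokens joined over the reversed input, then the base token, then all closing parens appended at once.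
import Mathlib
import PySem

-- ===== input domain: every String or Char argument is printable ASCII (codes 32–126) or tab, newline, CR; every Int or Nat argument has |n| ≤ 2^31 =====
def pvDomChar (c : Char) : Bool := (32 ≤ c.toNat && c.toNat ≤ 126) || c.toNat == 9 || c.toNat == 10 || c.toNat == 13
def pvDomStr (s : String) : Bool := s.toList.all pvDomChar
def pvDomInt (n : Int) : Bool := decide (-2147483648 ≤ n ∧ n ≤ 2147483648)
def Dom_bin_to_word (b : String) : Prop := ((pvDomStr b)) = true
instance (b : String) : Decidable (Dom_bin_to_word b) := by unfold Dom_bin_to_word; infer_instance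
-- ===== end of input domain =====

-- B builds the same nested string in one flat pass: opening tokens joined over the reversed
-- input, then "WO", then one closing paren per character — instead of wrapping an accumulator.


-- ===== PORT A =====
def bin_to_word (b : String) : String :=
  b.toList.foldl
    (fun word d =>
      if d = '0' then "(WS false " ++ word ++ ")" else "(WS true " ++ word ++ ")")
    "WO"

-- ===== PORT B =====
def bin_to_word_alt (b : String) : String :=
  let pre := String.join (b.toList.reverse.map
    (fun d => if d = '0' then "(WS false " else "(WS true "))
  pre ++ "WO" ++ String.ofList (List.replicate b.toList.length ')')

-- ===== PRECONDITION & SPEC =====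
def Spec_bin_to_word (b : String) (out : String) : Prop := out = bin_to_word_alt b
instance (b : String) (out : String) : Decidable (Spec_bin_to_word b out) := by unfold Spec_bin_to_word; infer_instance

-- ===== CLAIM (what is proved, stated in full; the proofs are below) =====
def Claim_equal_bin_to_word : Prop := ∀ (b : String), Dom_bin_to_word b → Spec_bin_to_word b (bin_to_word b)

-- ===== LEMMAS AND PROOFS =====

theorem join_snoc (L : List String) (a : String) :
    String.join (L ++ [a]) = String.join L ++ a := by
  simp [String.join]

theorem bin_to_word_loop (l : List Char) (w : String) :
    l.foldl
      (fun word d =>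
        if d = '0' then "(WS false " ++ word ++ ")" else "(WS true " ++ word ++ ")")
      w
    = String.join (l.reverse.map
        (fun d => if d = '0' then "(WS false " else "(WS true "))
      ++ w ++ String.ofList (List.replicate l.length ')') := by
  induction l generalizing w with
  | nil =>
    simp only [List.foldl_nil, List.reverse_nil, List.map_nil, List.length_nil,
      List.replicate_zero]
    show w = "" ++ w ++ ""
    simp
  | cons c l ih =>
    have hrep : String.ofList (List.replicate (l.length + 1) ')')
        = ")" ++ String.ofList (List.replicate l.length ')') := by
      have h1 : List.replicate (l.length + 1) ')' = [')'] ++ List.replicate l.length ')' := rfl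
      have h2 : (")" : String) = String.ofList [')'] := rfl
      rw [h1, String.ofList_append, h2]
    simp only [List.foldl_cons, ih, List.reverse_cons, List.map_append, List.map_cons,
      List.map_nil, join_snoc, List.length_cons, hrep]
    by_cases h : c = '0' <;>
      simp [h, String.append_assoc]

-- ===== VERDICT (by name: the statement is the Claim_ definition above) =====
theorem bin_to_word_spec : Claim_equal_bin_to_word := by
  intro b _
  unfold Spec_bin_to_word bin_to_word bin_to_word_alt
  simpa using bin_to_word_loop b.toList "WO"
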